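-- pv_equiv track=rewrite | github.com/kylel/pydvb | dvbsi/descriptors.py | bcd2int
-- ===== SOURCE A (Python) =====
-- def bcd2int(data):
--     res = 0
--     ln = len(data)
--     index = 0
--     while index < ln:
--         res *= 10
--         res += (data[index] & int('11110000', 2)) >> 4
--         res *= 10
--         res += data[index] & int('00001111', 2)
--         index += 1
--     return res
-- ===== SOURCE B (Python) =====
-- def bcd2int(data):
--     # Positional-weight algorithm: each byte holds two decimal digits, so a byte
--     # at distance k from the END contributes its two-digit value times 100**k.
--     # Accumulate right-to-left with a running place value instead of Horner.
--     res = 0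
--     place = 1
--     for b in reversed(data):
--         res += (((b & 0xF0) >> 4) * 10 + (b & 0x0F)) * place
--         place *= 100
--     return res
-- ===== Notes on version B (the rewrite author's own statement) =====
-- stated objective: alternative
-- what changed: Replaced A's left-to-right Horner accumulation (res = res*10 + nibble twice per byte) with a right-to-left positional-weight sum: iterate over reversed(data) keeping a place value that is multiplied by 100 per byte, adding byte_value * place; correct because the byte k positions from the end contributes its two-digit value times 100^k.
import Mathlib
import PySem

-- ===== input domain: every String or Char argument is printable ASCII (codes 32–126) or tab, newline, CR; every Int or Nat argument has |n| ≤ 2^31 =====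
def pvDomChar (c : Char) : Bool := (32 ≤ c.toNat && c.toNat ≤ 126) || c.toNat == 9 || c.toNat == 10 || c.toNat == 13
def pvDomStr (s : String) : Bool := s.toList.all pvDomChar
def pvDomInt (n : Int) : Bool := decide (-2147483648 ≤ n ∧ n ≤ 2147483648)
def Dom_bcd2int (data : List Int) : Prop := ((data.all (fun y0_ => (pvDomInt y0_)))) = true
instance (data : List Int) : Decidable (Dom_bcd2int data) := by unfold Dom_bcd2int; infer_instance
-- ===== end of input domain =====

-- B replaces A's left-to-right Horner accumulation with a right-to-left positional-weight
-- sum (running 100-power place value over reversed data); same cost, different algorithm.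
-- ===== PORT A =====
-- while loop over index 0..len-1, two multiply-add steps per byte, transliterated
def bcd2int (data : List Int) : Int :=
  (PySem.List.pyRange 0 (data.length : Int) 1).foldl
    (fun res index =>
      ((res * 10 + ((PySem.Int.band (PySem.List.pyGetD data index 0) 240) >>> 4)) * 10)
        + (PySem.Int.band (PySem.List.pyGetD data index 0) 15)) 0

-- ===== PORT B =====
-- B: fold over reversed data with state (res, place); res += byteValue * place; place *= 100
def bcd2int_alt (data : List Int) : Int :=
  (data.reverse.foldl
    (fun (st : Int × Int) b =>
      (st.1 + (((PySem.Int.band b 240) >>> 4) * 10 + PySem.Int.band b 15) * st.2,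
       st.2 * 100)) (0, 1)).1

-- ===== PRECONDITION & SPEC =====
def Spec_bcd2int (data : List Int) (out : Int) : Prop := out = bcd2int_alt data
instance (data : List Int) (out : Int) : Decidable (Spec_bcd2int data out) := by unfold Spec_bcd2int; infer_instance

-- ===== CLAIM (what is proved, stated in full; the proofs are below) =====
def Claim_equal_bcd2int : Prop := ∀ (data : List Int), Dom_bcd2int data → Spec_bcd2int data (bcd2int data)

-- ===== LEMMAS AND PROOFS =====
-- the two-digit value of one byte
def pvDigit (b : Int) : Int := ((PySem.Int.band b 240) >>> 4) * 10 + PySem.Int.band b 15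

-- the positional value of the whole byte list
def pvVal : List Int → Int
  | [] => 0
  | h :: t => pvDigit h * 100 ^ t.length + pvVal t

-- A's loop body as a fold over the list itself (Horner step by 100)
def pvHorner (l : List Int) (acc : Int) : Int :=
  l.foldl (fun res b => ((res * 10 + ((PySem.Int.band b 240) >>> 4)) * 10) + (PySem.Int.band b 15)) acc

theorem pvHorner_val (l : List Int) (acc : Int) :
    pvHorner l acc = acc * 100 ^ l.length + pvVal l := by
  induction l generalizing acc with
  | nil => simp [pvHorner, pvVal]
  | cons h t ih =>
    simp only [pvHorner, List.foldl_cons, List.length_cons, pvVal] at *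
    rw [ih]
    simp only [pvDigit]
    ring

theorem pvB_fold (l : List Int) (r p : Int) :
    l.reverse.foldl
      (fun (st : Int × Int) b => (st.1 + pvDigit b * st.2, st.2 * 100)) (r, p)
    = (r + p * pvVal l, p * 100 ^ l.length) := by
  induction l generalizing r p with
  | nil => simp [pvVal]
  | cons h t ih =>
    simp only [List.reverse_cons, List.foldl_append, List.foldl_cons, List.foldl_nil, ih,
      pvVal, List.length_cons, Prod.mk.injEq]
    constructor <;> ring

-- ===== VERDICT (by name: the statement is the Claim_ definition above) =====
theorem bcd2int_spec : Claim_equal_bcd2int := by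
  intro data _
  unfold Spec_bcd2int bcd2int bcd2int_alt
  rw [PySem.List.foldl_pyRange_zero_pyGetD' data 0
        (fun res b => ((res * 10 + ((PySem.Int.band b 240) >>> 4)) * 10) + (PySem.Int.band b 15)) 0]
  show pvHorner data 0 = _
  have hb := pvB_fold data 0 1
  simp only [pvDigit] at hb
  rw [hb, pvHorner_val]
  ring
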